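-- pv_equiv track=rewrite | github.com/aeeeeeep/ModelLink | mindspeed/core/pipeline_parallel/flexible_schedules.py | generate_1f1b_scheduler_plan
-- ===== SOURCE A (Python) =====
-- def generate_1f1b_scheduler_plan(pp_size, num_micro_batch):
--     scheduler_plan_all_stages = {}
--
--     num_warmup_microbatch = [pp_size - r - 1 for r in range(pp_size)]
--     num_cooldown_microbatch = num_warmup_microbatch
--     num_stable_microbatch = [(num_micro_batch * 2 - num_warmup_microbatch[r] - num_cooldown_microbatch[r]) // 2
--                              for r in range(pp_size)]
--
--     forward_count = [1 for _ in range(pp_size)]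
--     backward_count = [1 for _ in range(pp_size)]
--
--     # warmup
--     for pp_rank in range(pp_size):
--         key = 'stage{}'.format(pp_rank)
--         scheduler_plan_all_stages[key] = []
--         for i in range(num_warmup_microbatch[pp_rank]):
--             value = 'F{}'.format(forward_count[pp_rank])
--             scheduler_plan_all_stages[key].append(value)
--             forward_count[pp_rank] += 1
--
--     # stable
--     for pp_rank in range(pp_size):
--         key = 'stage{}'.format(pp_rank)
--         for i in range(num_stable_microbatch[pp_rank]):
--             value = 'F{}'.format(forward_count[pp_rank])
--             scheduler_plan_all_stages[key].append(value)
--             forward_count[pp_rank] += 1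
--
--             value = 'B{}'.format(backward_count[pp_rank])
--             scheduler_plan_all_stages[key].append(value)
--             backward_count[pp_rank] += 1
--
--     # cooldown
--     for pp_rank in range(pp_size):
--         key = 'stage{}'.format(pp_rank)
--         for i in range(num_cooldown_microbatch[pp_rank]):
--             value = 'B{}'.format(backward_count[pp_rank])
--             scheduler_plan_all_stages[key].append(value)
--             backward_count[pp_rank] += 1
--
--     return scheduler_plan_all_stages
-- ===== SOURCE B (Python) =====
-- def generate_1f1b_scheduler_plan(pp_size, num_micro_batch):
--     # Greedy two-pointer merge: each stage's plan is the merge of the forward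
--     # stream F1..Fn and backward stream B1..Bn, emitting a forward whenever one
--     # is available and at most w = pp_size - r - 1 forwards are in flight.
--     def stage_schedule(r):
--         w = pp_size - r - 1
--         n = w + max(num_micro_batch - w, 0)
--         out = []
--         f = b = 1
--         while f <= n or b <= n:
--             if f <= n and f <= b + w:
--                 out.append('F{}'.format(f))
--                 f += 1
--             else:
--                 out.append('B{}'.format(b))
--                 b += 1
--         return out
--     return {'stage{}'.format(r): stage_schedule(r) for r in range(pp_size)}
-- ===== Notes on version B (the rewrite author's own statement) =====
-- stated objective: alternative
-- what changed: Each stage's plan is produced by a greedy two-pointer merge of the forward stream F1..Fn and backward stream B1..Bn under the readiness rule 'emit a forward while at most w are in flight' (one while loop per stage), instead of A's three whole-pipeline warmup/stable/cooldown passes threading mutable forward/backward counter arrays.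
import Mathlib
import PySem

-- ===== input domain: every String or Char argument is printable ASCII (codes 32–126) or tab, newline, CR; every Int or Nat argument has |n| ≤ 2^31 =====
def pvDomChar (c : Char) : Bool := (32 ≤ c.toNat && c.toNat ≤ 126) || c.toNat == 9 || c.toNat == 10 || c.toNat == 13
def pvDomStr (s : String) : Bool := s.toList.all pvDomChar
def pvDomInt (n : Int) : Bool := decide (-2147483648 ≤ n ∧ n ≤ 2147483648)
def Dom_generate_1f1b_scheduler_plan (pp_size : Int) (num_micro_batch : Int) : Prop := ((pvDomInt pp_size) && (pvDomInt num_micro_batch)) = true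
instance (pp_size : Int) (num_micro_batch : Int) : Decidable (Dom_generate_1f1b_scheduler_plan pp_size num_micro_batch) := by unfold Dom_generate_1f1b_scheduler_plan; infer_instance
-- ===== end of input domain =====

-- B builds each stage's plan by a greedy two-pointer merge of the forward stream F1..Fn
-- and the backward stream B1..Bn (emit a forward whenever at most w are in flight),
-- one while loop per stage, instead of A's three whole-pipeline warmup/stable/cooldown
-- passes threading mutable counter arrays; same cost, a genuinely different construction.

-- ===== PORT A =====
def generate_1f1b_scheduler_plan (pp_size : Int) (num_micro_batch : Int) : List (String × List String) :=
  let ranks := PySem.List.pyRange 0 pp_size 1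
  let num_warmup := ranks.map (fun r => pp_size - r - 1)
  let num_cooldown := num_warmup
  let num_stable := ranks.map (fun r =>
    PySem.Int.floordiv (num_micro_batch * 2 - PySem.List.pyGetD num_warmup r 0
      - PySem.List.pyGetD num_cooldown r 0) 2)
  let forward_count := ranks.map (fun _ => (1 : Int))
  let backward_count := ranks.map (fun _ => (1 : Int))
  -- warmup
  let st1 : PySem.Dict String (List String) × List Int :=
    ranks.foldl (fun st pp_rank =>
      let key := "stage" ++ PySem.Int.toStr pp_rank
      let st := (st.1.insert key [], st.2)
      (PySem.List.pyRange 0 (PySem.List.pyGetD num_warmup pp_rank 0) 1).foldl (fun st _ =>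
        let v := "F" ++ PySem.Int.toStr (PySem.List.pyGetD st.2 pp_rank 0)
        (st.1.modify key [] (fun l => l ++ [v]),
         PySem.List.pySetD st.2 pp_rank (PySem.List.pyGetD st.2 pp_rank 0 + 1))) st)
      (PySem.Dict.empty, forward_count)
  -- stable
  let st2 : PySem.Dict String (List String) × List Int × List Int :=
    ranks.foldl (fun st pp_rank =>
      let key := "stage" ++ PySem.Int.toStr pp_rank
      (PySem.List.pyRange 0 (PySem.List.pyGetD num_stable pp_rank 0) 1).foldl (fun st _ =>
        let v := "F" ++ PySem.Int.toStr (PySem.List.pyGetD st.2.1 pp_rank 0)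
        let d := st.1.modify key [] (fun l => l ++ [v])
        let fc := PySem.List.pySetD st.2.1 pp_rank (PySem.List.pyGetD st.2.1 pp_rank 0 + 1)
        let v2 := "B" ++ PySem.Int.toStr (PySem.List.pyGetD st.2.2 pp_rank 0)
        let d := d.modify key [] (fun l => l ++ [v2])
        let bc := PySem.List.pySetD st.2.2 pp_rank (PySem.List.pyGetD st.2.2 pp_rank 0 + 1)
        (d, fc, bc)) st)
      (st1.1, st1.2, backward_count)
  -- cooldown
  let st3 : PySem.Dict String (List String) × List Int :=
    ranks.foldl (fun st pp_rank =>
      let key := "stage" ++ PySem.Int.toStr pp_rank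
      (PySem.List.pyRange 0 (PySem.List.pyGetD num_cooldown pp_rank 0) 1).foldl (fun st _ =>
        let v := "B" ++ PySem.Int.toStr (PySem.List.pyGetD st.2 pp_rank 0)
        (st.1.modify key [] (fun l => l ++ [v]),
         PySem.List.pySetD st.2 pp_rank (PySem.List.pyGetD st.2 pp_rank 0 + 1))) st)
      (st2.1, st2.2.2)
  st3.1.items

-- ===== PORT B =====
-- the per-stage while loop of Source B, ported with fuel (the fuel only makes the loop
-- total in Lean; at the call site 2*n steps provably suffice)
def pvMergeF : Nat → Int → Int → Int → Int → List String
  | 0, _, _, _, _ => []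
  | fuel+1, n, w, f, b =>
    if f ≤ n ∨ b ≤ n then
      if f ≤ n ∧ f ≤ b + w then
        ("F" ++ PySem.Int.toStr f) :: pvMergeF fuel n w (f+1) b
      else
        ("B" ++ PySem.Int.toStr b) :: pvMergeF fuel n w f (b+1)
    else []

def pvStageSchedule (pp_size : Int) (num_micro_batch : Int) (r : Int) : List String :=
  let w := pp_size - r - 1
  let n := w + max (num_micro_batch - w) 0
  pvMergeF (2*n).toNat n w 1 1

def generate_1f1b_scheduler_plan_alt (pp_size : Int) (num_micro_batch : Int) : List (String × List String) :=
  ((PySem.List.pyRange 0 pp_size 1).foldl (fun plan r =>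
    plan.insert ("stage" ++ PySem.Int.toStr r) (pvStageSchedule pp_size num_micro_batch r))
    PySem.Dict.empty).items

-- ===== PRECONDITION & SPEC =====
def Spec_generate_1f1b_scheduler_plan (pp_size : Int) (num_micro_batch : Int) (out : List (String × List String)) : Prop := out = generate_1f1b_scheduler_plan_alt pp_size num_micro_batch
instance (pp_size : Int) (num_micro_batch : Int) (out : List (String × List String)) : Decidable (Spec_generate_1f1b_scheduler_plan pp_size num_micro_batch out) := by unfold Spec_generate_1f1b_scheduler_plan; infer_instance

-- ===== CLAIM (what is proved, stated in full; the proofs are below) =====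
def Claim_equal_generate_1f1b_scheduler_plan : Prop := ∀ (pp_size : Int) (num_micro_batch : Int), Dom_generate_1f1b_scheduler_plan pp_size num_micro_batch → Spec_generate_1f1b_scheduler_plan pp_size num_micro_batch (generate_1f1b_scheduler_plan pp_size num_micro_batch)

-- ===== LEMMAS AND PROOFS =====

-- decimal decoding, to get injectivity of PySem.Int.toStr on nonnegatives
def pvDec (l : List Char) : Nat := l.foldl (fun a c => a * 10 + (c.toNat - 48)) 0

lemma pvDec_append_singleton (l : List Char) (c : Char) :
    pvDec (l ++ [c]) = pvDec l * 10 + (c.toNat - 48) := by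
  simp [pvDec]

lemma pvDec_toDigits (n : Nat) : pvDec (Nat.toDigits 10 n) = n := by
  induction n using Nat.strong_induction_on with
  | _ n ih =>
    rcases lt_or_ge n 10 with h | h
    · rw [Nat.toDigits_of_lt_base h]
      interval_cases n <;> decide
    · rw [Nat.toDigits_of_base_le (by norm_num) h, pvDec_append_singleton,
        ih (n / 10) (Nat.div_lt_self (by omega) (by norm_num))]
      have h2 : n % 10 < 10 := Nat.mod_lt _ (by norm_num)
      have : (Nat.digitChar (n % 10)).toNat - 48 = n % 10 := by
        interval_cases h3 : n % 10 <;> rfl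
      omega

lemma pvToStr_inj {a b : Int} (ha : 0 ≤ a) (hb : 0 ≤ b)
    (h : PySem.Int.toStr a = PySem.Int.toStr b) : a = b := by
  have h2 := congrArg String.toList h
  rw [PySem.Int.toList_toStr, PySem.Int.toList_toStr] at h2
  unfold PySem.Int.toChars at h2
  rw [if_neg (by omega), if_neg (by omega)] at h2
  have := congrArg pvDec h2
  rw [pvDec_toDigits, pvDec_toDigits] at this
  omega

def pvKey (r : Int) : String := "stage" ++ PySem.Int.toStr r

lemma pvKey_inj {a b : Int} (ha : 0 ≤ a) (hb : 0 ≤ b) (h : pvKey a = pvKey b) : a = b := by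
  apply pvToStr_inj ha hb
  have h2 := congrArg String.toList h
  unfold pvKey at h2
  rw [String.toList_append, String.toList_append] at h2
  have := List.append_cancel_left h2
  exact String.toList_inj.mp this

def pvLab (p : String) (c : Int) (m : Nat) : List String :=
  (List.range m).map (fun (i : Nat) => p ++ PySem.Int.toStr (c + (i : Int)))

lemma pvLab_succ (p : String) (c : Int) (j : Nat) :
    pvLab p c (j+1) = (p ++ PySem.Int.toStr c) :: pvLab p (c+1) j := by
  unfold pvLab
  rw [List.range_succ_eq_map, List.map_cons, List.map_map]
  simp only [Nat.cast_zero, add_zero]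
  congr 1
  apply List.map_congr_left
  intro i _
  simp only [Function.comp_apply]
  have h : c + ((i + 1 : Nat) : Int) = c + 1 + (i : Int) := by push_cast; ring
  rw [h]

lemma pvGetD_set_self (l : List Int) (k : Nat) (v : Int) (hk : k < l.length) :
    (l.set k v).getD k 0 = v := by
  rw [List.getD_eq_getElem?_getD, List.getElem?_set_self (by simpa using hk)]
  rfl

lemma pvSet_map_range {β : Type} (f : Nat → β) (n j : Nat) (v : β) (hj : j < n) :
    ((List.range n).map f).set j v = (List.range n).map (fun i => if i = j then v else f i) := by
  apply List.ext_getElem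
  · simp
  · intro i h1 h2
    simp only [List.length_set, List.length_map, List.length_range] at h1
    rw [List.getElem_set]
    simp only [List.getElem_map, List.getElem_range]
    by_cases h : j = i
    · subst h; simp
    · rw [if_neg h, if_neg (fun hh => h hh.symm)]

lemma pvInner1 {γ : Type} (L : List γ) (key pre : String) (k : Nat)
    (d : PySem.Dict String (List String)) (cnt : List Int) (hk : k < cnt.length) :
    L.foldl (fun (st : PySem.Dict String (List String) × List Int) _ =>
        (st.1.modify key [] (fun l => l ++ [pre ++ PySem.Int.toStr (PySem.List.pyGetD st.2 (k : Int) 0)]),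
         PySem.List.pySetD st.2 (k : Int) (PySem.List.pyGetD st.2 (k : Int) 0 + 1))) (d, cnt)
    = (((List.range L.length).map (fun (i : Nat) => (key, pre ++ PySem.Int.toStr (cnt.getD k 0 + (i : Int))))).foldl
        (fun d p => d.modify p.1 [] (fun l => l ++ [p.2])) d,
       cnt.set k (cnt.getD k 0 + (L.length : Int))) := by
  induction L generalizing d cnt with
  | nil =>
    simp only [List.foldl_nil, List.length_nil, List.range_zero, List.map_nil, Nat.cast_zero, add_zero]
    rw [List.getD_eq_getElem?_getD, List.getElem?_eq_getElem hk]
    simp [List.set_getElem_self]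
  | cons x t ih =>
    rw [List.foldl_cons, ih _ _ (by simpa using hk)]
    simp only [PySem.List.pyGetD_natCast, PySem.List.pySetD_natCast]
    rw [pvGetD_set_self cnt k _ hk]
    refine Prod.ext ?_ ?_
    · show List.foldl _ _ _ = List.foldl _ _ _
      rw [List.length_cons, List.range_succ_eq_map, List.map_cons, List.foldl_cons, List.map_map]
      simp only [Nat.cast_zero, add_zero]
      congr 1
      apply List.map_congr_left
      intro i _
      simp only [Function.comp_apply]
      have h2 : cnt.getD k 0 + ((i.succ : Nat) : Int) = cnt.getD k 0 + 1 + (i : Int) := by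
        push_cast [Nat.succ_eq_add_one]; ring
      rw [h2]
    · show List.set _ _ _ = List.set _ _ _
      rw [List.set_set]
      congr 1
      rw [List.length_cons]
      push_cast
      ring

lemma pvInner2 {γ : Type} (L : List γ) (key : String) (k : Nat)
    (d : PySem.Dict String (List String)) (fc bc : List Int)
    (hf : k < fc.length) (hb : k < bc.length) :
    L.foldl (fun (st : PySem.Dict String (List String) × List Int × List Int) _ =>
        ((st.1.modify key [] (fun l => l ++ ["F" ++ PySem.Int.toStr (PySem.List.pyGetD st.2.1 (k : Int) 0)])).modify
            key [] (fun l => l ++ ["B" ++ PySem.Int.toStr (PySem.List.pyGetD st.2.2 (k : Int) 0)]),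
         PySem.List.pySetD st.2.1 (k : Int) (PySem.List.pyGetD st.2.1 (k : Int) 0 + 1),
         PySem.List.pySetD st.2.2 (k : Int) (PySem.List.pyGetD st.2.2 (k : Int) 0 + 1))) (d, fc, bc)
    = (((List.range L.length).flatMap (fun (i : Nat) =>
          [(key, "F" ++ PySem.Int.toStr (fc.getD k 0 + (i : Int))),
           (key, "B" ++ PySem.Int.toStr (bc.getD k 0 + (i : Int)))])).foldl
        (fun d p => d.modify p.1 [] (fun l => l ++ [p.2])) d,
       fc.set k (fc.getD k 0 + (L.length : Int)),
       bc.set k (bc.getD k 0 + (L.length : Int))) := by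
  induction L generalizing d fc bc with
  | nil =>
    simp only [List.foldl_nil, List.length_nil, List.range_zero, List.flatMap_nil, Nat.cast_zero, add_zero]
    rw [List.getD_eq_getElem?_getD, List.getElem?_eq_getElem hf,
        List.getD_eq_getElem?_getD, List.getElem?_eq_getElem hb]
    simp [List.set_getElem_self]
  | cons x t ih =>
    rw [List.foldl_cons, ih _ _ _ (by simpa using hf) (by simpa using hb)]
    simp only [PySem.List.pyGetD_natCast, PySem.List.pySetD_natCast]
    rw [pvGetD_set_self fc k _ hf, pvGetD_set_self bc k _ hb]
    refine Prod.ext ?_ (Prod.ext ?_ ?_)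
    · show List.foldl _ _ _ = List.foldl _ _ _
      rw [List.length_cons, List.range_succ_eq_map, List.flatMap_cons, List.flatMap_map]
      simp only [Nat.cast_zero, add_zero]
      rw [List.foldl_append]
      congr 1
      · apply List.flatMap_congr
        intro i _
        have h2 : fc.getD k 0 + ((i.succ : Nat) : Int) = fc.getD k 0 + 1 + (i : Int) := by
          push_cast [Nat.succ_eq_add_one]; ring
        have h3 : bc.getD k 0 + ((i.succ : Nat) : Int) = bc.getD k 0 + 1 + (i : Int) := by
          push_cast [Nat.succ_eq_add_one]; ring
        rw [h2, h3]
    · show List.set _ _ _ = List.set _ _ _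
      rw [List.set_set]
      congr 1
      rw [List.length_cons]
      push_cast
      ring
    · show List.set _ _ _ = List.set _ _ _
      rw [List.set_set]
      congr 1
      rw [List.length_cons]
      push_cast
      ring

lemma pvSet_update_of_subset (s : PySem.Set String) (l : List String) (h : ∀ x ∈ l, x ∈ s) :
    PySem.Set.update s l = s := by
  induction l generalizing s with
  | nil => rfl
  | cons x t ih =>
    have hx : x ∈ s := h x (by simp)
    have : PySem.Set.add s x = s := by
      simp [PySem.Set.add, PySem.Set.contains, hx]
    simp only [PySem.Set.update, List.foldl_cons] at *
    rw [this]
    exact ih s (fun y hy => h y (by simp [hy]))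

lemma pvFoldMod_getD (ps : List (String × String)) (key c : String)
    (h : ∀ p ∈ ps, p.1 = key) (d : PySem.Dict String (List String)) :
    (ps.foldl (fun d p => d.modify p.1 [] (fun l => l ++ [p.2])) d).getD c []
      = if c = key then d.getD c [] ++ ps.map (·.2) else d.getD c [] := by
  rw [PySem.Dict.getD_foldl_modify_append]
  by_cases hc : c = key
  · subst hc
    rw [if_pos rfl]
    congr 1
    rw [List.filter_eq_self.mpr]
    intro p hp
    simp [h p hp]
  · rw [if_neg hc]
    have : ps.filter (fun p => p.1 == c) = [] := by
      apply List.filter_eq_nil_iff.mpr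
      intro p hp
      simp only [h p hp, beq_iff_eq]
      exact fun hh => hc hh.symm
    rw [this]
    simp

lemma pvFoldMod_keys (ps : List (String × String)) (key : String)
    (h : ∀ p ∈ ps, p.1 = key) (d : PySem.Dict String (List String)) (hk : key ∈ d.keys) :
    (ps.foldl (fun d p => d.modify p.1 [] (fun l => l ++ [p.2])) d).keys = d.keys := by
  have hh := PySem.Dict.keys_foldl_modify_key ps (fun p : String × String => p.1) ([] : List String)
    (fun _ p v => v ++ [p.2]) d
  simp only at hh
  rw [hh]
  · apply pvSet_update_of_subset
    intro x hx
    rcases List.mem_map.mp hx with ⟨p, hp, rfl⟩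
    rw [h p hp]; exact hk

def pvW (n k : Nat) : Nat := n - 1 - k
def pvS (n : Nat) (nm : Int) (k : Nat) : Nat := (nm - ((pvW n k : Nat) : Int)).toNat

def pvContA (n : Nat) (nm : Int) (k : Nat) : List String :=
  pvLab "F" 1 (pvW n k)
    ++ (List.range (pvS n nm k)).flatMap (fun (i : Nat) =>
         ["F" ++ PySem.Int.toStr (1 + ((pvW n k : Nat) : Int) + (i : Int)),
          "B" ++ PySem.Int.toStr (1 + (i : Int))])
    ++ pvLab "B" (1 + ((pvS n nm k : Nat) : Int)) (pvW n k)

def pvStepW (n : Nat) : (PySem.Dict String (List String) × List Int) → Int →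
    (PySem.Dict String (List String) × List Int) := fun st pp_rank =>
  let key := "stage" ++ PySem.Int.toStr pp_rank
  let st := (st.1.insert key [], st.2)
  (PySem.List.pyRange 0 (PySem.List.pyGetD
      ((PySem.List.pyRange 0 (n : Int) 1).map (fun r => (n : Int) - r - 1)) pp_rank 0) 1).foldl
    (fun st _ =>
      (st.1.modify key [] (fun l => l ++ ["F" ++ PySem.Int.toStr (PySem.List.pyGetD st.2 pp_rank 0)]),
       PySem.List.pySetD st.2 pp_rank (PySem.List.pyGetD st.2 pp_rank 0 + 1))) st

lemma pvKeyNotMem (j : Nat) (l : List Nat) (hj : j ∉ l) :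
    pvKey (j : Int) ∉ l.map (fun (k : Nat) => pvKey (k : Int)) := by
  intro hmem
  rcases List.mem_map.mp hmem with ⟨k, hk, hkey⟩
  exact hj ((Nat.cast_inj.mp (pvKey_inj (by positivity) (by positivity) hkey)) ▸ hk)

lemma pvWarmPass (n j : Nat) (hj : j ≤ n) :
    (((List.range j).map (fun (k : Nat) => (k : Int))).foldl (pvStepW n)
        (PySem.Dict.empty, (List.range n).map (fun _ => (1 : Int)))).1.keys
      = (List.range j).map (fun (k : Nat) => pvKey (k : Int))
    ∧ (∀ k : Nat, k < n →
      (((List.range j).map (fun (k : Nat) => (k : Int))).foldl (pvStepW n)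
        (PySem.Dict.empty, (List.range n).map (fun _ => (1 : Int)))).1.getD (pvKey (k : Int)) []
      = if k < j then pvLab "F" 1 (pvW n k) else [])
    ∧ (((List.range j).map (fun (k : Nat) => (k : Int))).foldl (pvStepW n)
        (PySem.Dict.empty, (List.range n).map (fun _ => (1 : Int)))).2
      = (List.range n).map (fun i => if i < j then 1 + ((pvW n i : Nat) : Int) else 1) := by
  induction j with
  | zero =>
    refine ⟨by simp, fun k hk => by simp [PySem.Dict.getD_empty], ?_⟩
    simp
  | succ j ihj =>
    have hjn : j < n := hj
    obtain ⟨h1, h2, h3⟩ := ihj (by omega)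
    rw [List.range_succ, List.map_append, List.foldl_append]
    set prev := ((List.range j).map (fun (k : Nat) => (k : Int))).foldl (pvStepW n)
        (PySem.Dict.empty, (List.range n).map (fun _ => (1 : Int))) with hprev
    simp only [List.map_cons, List.map_nil, List.foldl_cons, List.foldl_nil]
    have hlen2 : prev.2.length = n := by rw [h3]; simp
    have hwarm : PySem.List.pyGetD
        ((PySem.List.pyRange 0 (n : Int) 1).map (fun r => (n : Int) - r - 1)) (j : Int) 0
        = ((pvW n j : Nat) : Int) := by
      rw [PySem.List.pyGetD_map_pyRange (fun r => (n : Int) - r - 1) n j 0 hjn]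
      unfold pvW; push_cast; omega
    have hcont : prev.1.contains (pvKey (j : Int)) = false := by
      rw [PySem.Dict.contains_eq_decide_mem_keys, h1]
      simp only [decide_eq_false_iff_not]
      exact pvKeyNotMem j (List.range j) (by simp)
    have hc1 : prev.2.getD j 0 = 1 := by
      rw [h3, PySem.List.getD_map_range _ _ _ _ hjn, if_neg (by omega)]
    unfold pvStepW
    simp only [hwarm]
    rw [pvInner1 _ _ _ j _ _ (by simpa [hlen2] using hjn)]
    rw [hc1]
    have hps : ∀ p ∈ (List.range (PySem.List.pyRange 0 ((pvW n j : Nat) : Int) 1).length).map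
        (fun (i : Nat) => (("stage" ++ PySem.Int.toStr (j : Int) : String),
          "F" ++ PySem.Int.toStr (1 + (i : Int)))), p.1 = "stage" ++ PySem.Int.toStr (j : Int) := by
      intro p hp
      rcases List.mem_map.mp hp with ⟨i, _, rfl⟩
      rfl
    have hkeyj : ("stage" ++ PySem.Int.toStr (j : Int) : String) = pvKey (j : Int) := rfl
    have hkeys_ins : (prev.1.insert (pvKey (j : Int)) []).keys
        = (List.range j).map (fun (k : Nat) => pvKey (k : Int)) ++ [pvKey (j : Int)] := by
      rw [PySem.Dict.keys_insert_of_not_contains _ _ hcont, h1]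
    have hlenrange : (PySem.List.pyRange 0 ((pvW n j : Nat) : Int) 1).length = pvW n j := by
      rw [PySem.List.length_pyRange_one]; simp
    refine ⟨?_, ?_, ?_⟩
    · rw [hkeyj, pvFoldMod_keys _ _ (by rw [hkeyj] at hps; exact hps) _
        (by rw [hkeys_ins]; simp)]
      rw [hkeys_ins]
      simp
    · intro k hk
      rw [hkeyj, pvFoldMod_getD _ _ _ (by rw [hkeyj] at hps; exact hps)]
      by_cases hkj : k = j
      · subst hkj
        rw [if_pos rfl, PySem.Dict.getD_insert, if_pos rfl, if_pos (by omega)]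
        rw [hlenrange]
        simp only [List.nil_append, List.map_map]
        rfl
      · have hne : pvKey (k : Int) ≠ pvKey (j : Int) := by
          intro hcontra
          exact hkj (Nat.cast_inj.mp (pvKey_inj (by positivity) (by positivity) hcontra))
        rw [if_neg hne, PySem.Dict.getD_insert, if_neg hne, h2 k hk]
        by_cases hlt : k < j
        · rw [if_pos hlt, if_pos (by omega)]
        · rw [if_neg hlt, if_neg (by omega)]
    · rw [h3]
      rw [pvSet_map_range _ _ _ _ hjn]
      apply List.map_congr_left
      intro i hi
      have hin : i < n := List.mem_range.mp hi
      rw [hlenrange]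
      by_cases hij : i = j
      · subst hij
        rw [if_pos rfl, if_pos (by omega)]
      · rw [if_neg hij]
        by_cases hlt : i < j
        · rw [if_pos hlt, if_pos (by omega)]
        · rw [if_neg hlt, if_neg (by omega)]

def pvBlock (n : Nat) (nm : Int) (k : Nat) : List String :=
  (List.range (pvS n nm k)).flatMap (fun (i : Nat) =>
    ["F" ++ PySem.Int.toStr (1 + ((pvW n k : Nat) : Int) + (i : Int)),
     "B" ++ PySem.Int.toStr (1 + (i : Int))])

lemma pvContA_eq (n : Nat) (nm : Int) (k : Nat) :
    pvContA n nm k = pvLab "F" 1 (pvW n k) ++ pvBlock n nm k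
      ++ pvLab "B" (1 + ((pvS n nm k : Nat) : Int)) (pvW n k) := by
  unfold pvContA pvBlock
  simp [List.append_assoc]

def pvStepS (n : Nat) (nm : Int) :
    (PySem.Dict String (List String) × List Int × List Int) → Int →
    (PySem.Dict String (List String) × List Int × List Int) := fun st pp_rank =>
  let key := "stage" ++ PySem.Int.toStr pp_rank
  (PySem.List.pyRange 0 (PySem.List.pyGetD
      ((PySem.List.pyRange 0 (n : Int) 1).map (fun r =>
        PySem.Int.floordiv (nm * 2
          - PySem.List.pyGetD ((PySem.List.pyRange 0 (n : Int) 1).map (fun r => (n : Int) - r - 1)) r 0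
          - PySem.List.pyGetD ((PySem.List.pyRange 0 (n : Int) 1).map (fun r => (n : Int) - r - 1)) r 0) 2))
      pp_rank 0) 1).foldl
    (fun st _ =>
      ((st.1.modify key [] (fun l => l ++ ["F" ++ PySem.Int.toStr (PySem.List.pyGetD st.2.1 pp_rank 0)])).modify
          key [] (fun l => l ++ ["B" ++ PySem.Int.toStr (PySem.List.pyGetD st.2.2 pp_rank 0)]),
       PySem.List.pySetD st.2.1 pp_rank (PySem.List.pyGetD st.2.1 pp_rank 0 + 1),
       PySem.List.pySetD st.2.2 pp_rank (PySem.List.pyGetD st.2.2 pp_rank 0 + 1))) st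

lemma pvStablePass (n j : Nat) (nm : Int) (hj : j ≤ n) (d0 : PySem.Dict String (List String))
    (hkeys : d0.keys = (List.range n).map (fun (k : Nat) => pvKey (k : Int)))
    (hget : ∀ k : Nat, k < n → d0.getD (pvKey (k : Int)) [] = pvLab "F" 1 (pvW n k)) :
    (((List.range j).map (fun (k : Nat) => (k : Int))).foldl (pvStepS n nm)
        (d0, (List.range n).map (fun i => 1 + ((pvW n i : Nat) : Int)),
         (List.range n).map (fun _ => (1 : Int)))).1.keys = d0.keys
    ∧ (∀ k : Nat, k < n →
      (((List.range j).map (fun (k : Nat) => (k : Int))).foldl (pvStepS n nm)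
        (d0, (List.range n).map (fun i => 1 + ((pvW n i : Nat) : Int)),
         (List.range n).map (fun _ => (1 : Int)))).1.getD (pvKey (k : Int)) []
      = if k < j then pvLab "F" 1 (pvW n k) ++ pvBlock n nm k else pvLab "F" 1 (pvW n k))
    ∧ (((List.range j).map (fun (k : Nat) => (k : Int))).foldl (pvStepS n nm)
        (d0, (List.range n).map (fun i => 1 + ((pvW n i : Nat) : Int)),
         (List.range n).map (fun _ => (1 : Int)))).2.1
      = (List.range n).map (fun i => if i < j then 1 + ((pvW n i : Nat) : Int) + ((pvS n nm i : Nat) : Int) else 1 + ((pvW n i : Nat) : Int))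
    ∧ (((List.range j).map (fun (k : Nat) => (k : Int))).foldl (pvStepS n nm)
        (d0, (List.range n).map (fun i => 1 + ((pvW n i : Nat) : Int)),
         (List.range n).map (fun _ => (1 : Int)))).2.2
      = (List.range n).map (fun i => if i < j then 1 + ((pvS n nm i : Nat) : Int) else 1) := by
  induction j with
  | zero =>
    refine ⟨rfl, fun k hk => by simp [hget k hk], by simp, by simp⟩
  | succ j ihj =>
    have hjn : j < n := hj
    obtain ⟨h1, h2, h3, h4⟩ := ihj (by omega)
    rw [List.range_succ, List.map_append, List.foldl_append]
    set prev := ((List.range j).map (fun (k : Nat) => (k : Int))).foldl (pvStepS n nm)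
        (d0, (List.range n).map (fun i => 1 + ((pvW n i : Nat) : Int)),
         (List.range n).map (fun _ => (1 : Int))) with hprev
    simp only [List.map_cons, List.map_nil, List.foldl_cons, List.foldl_nil]
    have hlenf : prev.2.1.length = n := by rw [h3]; simp
    have hlenb : prev.2.2.length = n := by rw [h4]; simp
    have hwarmj : PySem.List.pyGetD
        ((PySem.List.pyRange 0 (n : Int) 1).map (fun r => (n : Int) - r - 1)) (j : Int) 0
        = ((pvW n j : Nat) : Int) := by
      rw [PySem.List.pyGetD_map_pyRange (fun r => (n : Int) - r - 1) n j 0 hjn]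
      unfold pvW; push_cast; omega
    have hstable : PySem.List.pyGetD
        ((PySem.List.pyRange 0 (n : Int) 1).map (fun r =>
          PySem.Int.floordiv (nm * 2
            - PySem.List.pyGetD ((PySem.List.pyRange 0 (n : Int) 1).map (fun r => (n : Int) - r - 1)) r 0
            - PySem.List.pyGetD ((PySem.List.pyRange 0 (n : Int) 1).map (fun r => (n : Int) - r - 1)) r 0) 2))
        (j : Int) 0 = nm - ((pvW n j : Nat) : Int) := by
      rw [PySem.List.pyGetD_map_pyRange _ n j 0 hjn, hwarmj]
      have he : nm * 2 - ((pvW n j : Nat) : Int) - ((pvW n j : Nat) : Int)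
          = (nm - ((pvW n j : Nat) : Int)) * 2 := by ring
      rw [he, PySem.Int.floordiv_eq_ediv_of_pos (by norm_num), Int.mul_ediv_cancel _ (by norm_num)]
    have hfj : prev.2.1.getD j 0 = 1 + ((pvW n j : Nat) : Int) := by
      rw [h3, PySem.List.getD_map_range _ _ _ _ hjn, if_neg (by omega)]
    have hbj : prev.2.2.getD j 0 = 1 := by
      rw [h4, PySem.List.getD_map_range _ _ _ _ hjn, if_neg (by omega)]
    unfold pvStepS
    simp only [hstable]
    rw [pvInner2 _ _ j _ _ _ (by rwa [hlenf]) (by rwa [hlenb])]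
    rw [hfj, hbj]
    have hlenrange : (PySem.List.pyRange 0 (nm - ((pvW n j : Nat) : Int)) 1).length = pvS n nm j := by
      rw [PySem.List.length_pyRange_one]
      unfold pvS
      simp
    have hkeyj : ("stage" ++ PySem.Int.toStr (j : Int) : String) = pvKey (j : Int) := rfl
    have hps : ∀ p ∈ (List.range (PySem.List.pyRange 0 (nm - ((pvW n j : Nat) : Int)) 1).length).flatMap
        (fun (i : Nat) =>
          [(("stage" ++ PySem.Int.toStr (j : Int) : String), "F" ++ PySem.Int.toStr (1 + ((pvW n j : Nat) : Int) + (i : Int))),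
           (("stage" ++ PySem.Int.toStr (j : Int) : String), "B" ++ PySem.Int.toStr (1 + (i : Int)))]),
        p.1 = "stage" ++ PySem.Int.toStr (j : Int) := by
      intro p hp
      rcases List.mem_flatMap.mp hp with ⟨i, _, hpi⟩
      simp only [List.mem_cons, List.not_mem_nil, or_false] at hpi
      rcases hpi with rfl | rfl <;> rfl
    refine ⟨?_, ?_, ?_, ?_⟩
    · rw [hkeyj, pvFoldMod_keys _ _ (by rw [hkeyj] at hps; exact hps) _ ?_]
      · exact h1
      · rw [h1, hkeys]
        exact List.mem_map.mpr ⟨j, by simp [hjn]⟩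
    · intro k hk
      rw [hkeyj, pvFoldMod_getD _ _ _ (by rw [hkeyj] at hps; exact hps)]
      by_cases hkj : k = j
      · subst hkj
        rw [if_pos rfl, h2 k hk, if_neg (by omega), if_pos (by omega)]
        congr 1
        rw [hlenrange]
        unfold pvBlock
        rw [List.map_flatMap]
        rfl
      · have hne : pvKey (k : Int) ≠ pvKey (j : Int) := by
          intro hcontra
          exact hkj (Nat.cast_inj.mp (pvKey_inj (by positivity) (by positivity) hcontra))
        rw [if_neg hne, h2 k hk]
        by_cases hlt : k < j
        · rw [if_pos hlt, if_pos (by omega)]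
        · rw [if_neg hlt, if_neg (by omega)]
    · rw [h3, pvSet_map_range _ _ _ _ hjn, hlenrange]
      apply List.map_congr_left
      intro i hi
      by_cases hij : i = j
      · subst hij
        rw [if_pos rfl, if_pos (by omega)]
      · rw [if_neg hij]
        by_cases hlt : i < j
        · rw [if_pos hlt, if_pos (by omega)]
        · rw [if_neg hlt, if_neg (by omega)]
    · rw [h4, pvSet_map_range _ _ _ _ hjn, hlenrange]
      apply List.map_congr_left
      intro i hi
      by_cases hij : i = j
      · subst hij
        rw [if_pos rfl, if_pos (by omega)]
      · rw [if_neg hij]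
        by_cases hlt : i < j
        · rw [if_pos hlt, if_pos (by omega)]
        · rw [if_neg hlt, if_neg (by omega)]

def pvStepC (n : Nat) : (PySem.Dict String (List String) × List Int) → Int →
    (PySem.Dict String (List String) × List Int) := fun st pp_rank =>
  let key := "stage" ++ PySem.Int.toStr pp_rank
  (PySem.List.pyRange 0 (PySem.List.pyGetD
      ((PySem.List.pyRange 0 (n : Int) 1).map (fun r => (n : Int) - r - 1)) pp_rank 0) 1).foldl
    (fun st _ =>
      (st.1.modify key [] (fun l => l ++ ["B" ++ PySem.Int.toStr (PySem.List.pyGetD st.2 pp_rank 0)]),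
       PySem.List.pySetD st.2 pp_rank (PySem.List.pyGetD st.2 pp_rank 0 + 1))) st

lemma pvCoolPass (n j : Nat) (nm : Int) (hj : j ≤ n) (d0 : PySem.Dict String (List String))
    (hkeys : d0.keys = (List.range n).map (fun (k : Nat) => pvKey (k : Int)))
    (hget : ∀ k : Nat, k < n → d0.getD (pvKey (k : Int)) []
      = pvLab "F" 1 (pvW n k) ++ pvBlock n nm k) :
    (((List.range j).map (fun (k : Nat) => (k : Int))).foldl (pvStepC n)
        (d0, (List.range n).map (fun i => 1 + ((pvS n nm i : Nat) : Int)))).1.keys = d0.keys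
    ∧ (∀ k : Nat, k < n →
      (((List.range j).map (fun (k : Nat) => (k : Int))).foldl (pvStepC n)
        (d0, (List.range n).map (fun i => 1 + ((pvS n nm i : Nat) : Int)))).1.getD (pvKey (k : Int)) []
      = if k < j then pvContA n nm k else pvLab "F" 1 (pvW n k) ++ pvBlock n nm k)
    ∧ (((List.range j).map (fun (k : Nat) => (k : Int))).foldl (pvStepC n)
        (d0, (List.range n).map (fun i => 1 + ((pvS n nm i : Nat) : Int)))).2
      = (List.range n).map (fun i =>
          if i < j then 1 + ((pvS n nm i : Nat) : Int) + ((pvW n i : Nat) : Int)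
          else 1 + ((pvS n nm i : Nat) : Int)) := by
  induction j with
  | zero =>
    refine ⟨rfl, fun k hk => by simp [hget k hk], by simp⟩
  | succ j ihj =>
    have hjn : j < n := hj
    obtain ⟨h1, h2, h3⟩ := ihj (by omega)
    rw [List.range_succ, List.map_append, List.foldl_append]
    set prev := ((List.range j).map (fun (k : Nat) => (k : Int))).foldl (pvStepC n)
        (d0, (List.range n).map (fun i => 1 + ((pvS n nm i : Nat) : Int))) with hprev
    simp only [List.map_cons, List.map_nil, List.foldl_cons, List.foldl_nil]
    have hlen2 : prev.2.length = n := by rw [h3]; simp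
    have hwarmj : PySem.List.pyGetD
        ((PySem.List.pyRange 0 (n : Int) 1).map (fun r => (n : Int) - r - 1)) (j : Int) 0
        = ((pvW n j : Nat) : Int) := by
      rw [PySem.List.pyGetD_map_pyRange (fun r => (n : Int) - r - 1) n j 0 hjn]
      unfold pvW; push_cast; omega
    have hcj : prev.2.getD j 0 = 1 + ((pvS n nm j : Nat) : Int) := by
      rw [h3, PySem.List.getD_map_range _ _ _ _ hjn, if_neg (by omega)]
    unfold pvStepC
    simp only [hwarmj]
    rw [pvInner1 _ _ _ j _ _ (by rwa [hlen2])]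
    rw [hcj]
    have hlenrange : (PySem.List.pyRange 0 ((pvW n j : Nat) : Int) 1).length = pvW n j := by
      rw [PySem.List.length_pyRange_one]; simp
    have hkeyj : ("stage" ++ PySem.Int.toStr (j : Int) : String) = pvKey (j : Int) := rfl
    have hps : ∀ p ∈ (List.range (PySem.List.pyRange 0 ((pvW n j : Nat) : Int) 1).length).map
        (fun (i : Nat) => (("stage" ++ PySem.Int.toStr (j : Int) : String),
          "B" ++ PySem.Int.toStr (1 + ((pvS n nm j : Nat) : Int) + (i : Int)))),
        p.1 = "stage" ++ PySem.Int.toStr (j : Int) := by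
      intro p hp
      rcases List.mem_map.mp hp with ⟨i, _, rfl⟩
      rfl
    refine ⟨?_, ?_, ?_⟩
    · rw [hkeyj, pvFoldMod_keys _ _ (by rw [hkeyj] at hps; exact hps) _ ?_]
      · exact h1
      · rw [h1, hkeys]
        exact List.mem_map.mpr ⟨j, by simp [hjn]⟩
    · intro k hk
      rw [hkeyj, pvFoldMod_getD _ _ _ (by rw [hkeyj] at hps; exact hps)]
      by_cases hkj : k = j
      · subst hkj
        rw [if_pos rfl, h2 k hk, if_neg (by omega), if_pos (by omega), pvContA_eq]
        congr 1
        rw [hlenrange]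
        unfold pvLab
        rw [List.map_map]
        rfl
      · have hne : pvKey (k : Int) ≠ pvKey (j : Int) := by
          intro hcontra
          exact hkj (Nat.cast_inj.mp (pvKey_inj (by positivity) (by positivity) hcontra))
        rw [if_neg hne, h2 k hk]
        by_cases hlt : k < j
        · rw [if_pos hlt, if_pos (by omega)]
        · rw [if_neg hlt, if_neg (by omega)]
    · rw [h3, pvSet_map_range _ _ _ _ hjn, hlenrange]
      apply List.map_congr_left
      intro i hi
      by_cases hij : i = j
      · subst hij
        rw [if_pos rfl, if_pos (by omega)]
      · rw [if_neg hij]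
        by_cases hlt : i < j
        · rw [if_pos hlt, if_pos (by omega)]
        · rw [if_neg hlt, if_neg (by omega)]

-- ===== characterisation of the B-side merge loop =====

lemma pvMergeF_cool (n w : Int) : ∀ (j fuel : Nat) (f b : Int), ¬ f ≤ n → b + (j : Int) = n + 1 →
    j ≤ fuel → pvMergeF fuel n w f b = pvLab "B" b j := by
  intro j
  induction j with
  | zero =>
    intro fuel f b hf hb _
    cases fuel with
    | zero => simp [pvMergeF, pvLab]
    | succ fu =>
      unfold pvMergeF
      rw [if_neg (by omega)]
      simp [pvLab]
  | succ j ih =>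
    intro fuel f b hf hb hfuel
    cases fuel with
    | zero => omega
    | succ fu =>
      unfold pvMergeF
      rw [if_pos (by right; omega), if_neg (by omega)]
      rw [ih fu f (b+1) hf (by push_cast at hb ⊢; omega) (by omega)]
      rw [pvLab_succ]

lemma pvMergeF_stab (w s : Nat) : ∀ (j : Nat), ∀ (fuel t : Nat), t + j = s → 2*j + w ≤ fuel →
    pvMergeF fuel ((w : Int) + (s : Int)) (w : Int) ((w : Int) + (t : Int) + 1) ((t : Int) + 1)
      = (List.range j).flatMap (fun (i : Nat) =>
          ["F" ++ PySem.Int.toStr ((w : Int) + (t : Int) + 1 + (i : Int)),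
           "B" ++ PySem.Int.toStr ((t : Int) + 1 + (i : Int))])
        ++ pvLab "B" ((s : Int) + 1) w := by
  intro j
  induction j with
  | zero =>
    intro fuel t ht hfuel
    have hts : t = s := by omega
    subst hts
    rw [List.range_zero, List.flatMap_nil, List.nil_append]
    exact pvMergeF_cool _ _ w fuel _ _ (by omega) (by push_cast; ring) (by omega)
  | succ j ih =>
    intro fuel t ht hfuel
    cases fuel with
    | zero => omega
    | succ fu =>
      unfold pvMergeF
      rw [if_pos (by left; push_cast; omega), if_pos (by constructor <;> [push_cast; skip] <;> omega)]
      cases fu with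
      | zero => omega
      | succ fu' =>
        unfold pvMergeF
        rw [if_pos (by right; push_cast; omega), if_neg (by omega)]
        have hrec := ih fu' (t+1) (by omega) (by omega)
        have he1 : (w : Int) + (t : Int) + 1 + 1 = (w : Int) + ((t+1 : Nat) : Int) + 1 := by push_cast; ring
        have he2 : (t : Int) + 1 + 1 = ((t+1 : Nat) : Int) + 1 := by push_cast; ring
        rw [he1, he2, hrec]
        rw [List.range_succ_eq_map, List.flatMap_cons, List.flatMap_map]
        simp only [Nat.cast_zero, add_zero, List.cons_append, List.nil_append]
        congr 2
        · congr 1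
          apply List.flatMap_congr
          intro i _
          have g1 : (w : Int) + ((t+1 : Nat) : Int) + 1 + (i : Int)
              = (w : Int) + (t : Int) + 1 + ((i + 1 : Nat) : Int) := by push_cast; ring
          have g2 : ((t+1 : Nat) : Int) + 1 + (i : Int) = (t : Int) + 1 + ((i + 1 : Nat) : Int) := by
            push_cast; ring
          rw [g1, g2]

lemma pvMergeF_warm (w s : Nat) : ∀ (j : Nat), ∀ (fuel t : Nat), t + j = w → j + 2*s + w ≤ fuel →
    pvMergeF fuel ((w : Int) + (s : Int)) (w : Int) ((t : Int) + 1) 1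
      = pvLab "F" ((t : Int) + 1) j
        ++ (List.range s).flatMap (fun (i : Nat) =>
            ["F" ++ PySem.Int.toStr ((w : Int) + 1 + (i : Int)),
             "B" ++ PySem.Int.toStr (1 + (i : Int))])
        ++ pvLab "B" ((s : Int) + 1) w := by
  intro j
  induction j with
  | zero =>
    intro fuel t ht hfuel
    have htw : t = w := by omega
    subst htw
    have hstab := pvMergeF_stab t s s fuel 0 (by omega) (by omega)
    simp only [Nat.cast_zero, add_zero, zero_add] at hstab
    rw [hstab]
    simp [pvLab]
  | succ j ih =>
    intro fuel t ht hfuel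
    cases fuel with
    | zero => omega
    | succ fu =>
      unfold pvMergeF
      rw [if_pos (by left; push_cast; omega), if_pos (by constructor <;> push_cast <;> omega)]
      have he : (t : Int) + 1 + 1 = ((t+1 : Nat) : Int) + 1 := by push_cast; ring
      rw [he, ih fu (t+1) (by omega) (by omega), pvLab_succ]
      simp

-- the per-stage merge computes exactly the schedule pvContA of stage k
lemma pvStageSchedule_eq (N : Nat) (nm : Int) (k : Nat) (hk : k < N) :
    pvStageSchedule (N : Int) nm (k : Int) = pvContA N nm k := by
  unfold pvStageSchedule
  have hw : (N : Int) - (k : Int) - 1 = ((pvW N k : Nat) : Int) := by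
    unfold pvW; push_cast; omega
  have hs : max (nm - ((pvW N k : Nat) : Int)) 0 = ((pvS N nm k : Nat) : Int) := by
    unfold pvS
    rw [Int.toNat_eq_max]
  simp only [hw, hs]
  have hfuel : (2 * (((pvW N k : Nat) : Int) + ((pvS N nm k : Nat) : Int))).toNat
      = 2 * (pvW N k) + 2 * (pvS N nm k) := by omega
  rw [hfuel]
  have hwarm := pvMergeF_warm (pvW N k) (pvS N nm k) (pvW N k)
    (2 * (pvW N k) + 2 * (pvS N nm k)) 0 (by omega) (by omega)
  simp only [Nat.cast_zero, zero_add] at hwarm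
  rw [hwarm]
  unfold pvContA
  congr 1
  congr 1
  · apply List.flatMap_congr
    intro i _
    have g : ((pvW N k : Nat) : Int) + 1 + (i : Int) = 1 + ((pvW N k : Nat) : Int) + (i : Int) := by
      ring
    rw [g]
  · rw [add_comm ((pvS N nm k : Nat) : Int) 1]

lemma pvNodupKeys (n : Nat) :
    ((List.range n).map (fun (k : Nat) => pvKey (k : Int))).Nodup := by
  apply List.Nodup.map_on
  · intro a _ b _ h
    exact Nat.cast_inj.mp (pvKey_inj (by positivity) (by positivity) h)
  · exact List.nodup_range

lemma pvPortB (n : Nat) (nm : Int) :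
    generate_1f1b_scheduler_plan_alt (n : Int) nm
      = (List.range n).map (fun (k : Nat) => (pvKey (k : Int), pvContA n nm k)) := by
  have hB : generate_1f1b_scheduler_plan_alt (n : Int) nm
      = ((PySem.List.pyRange 0 (n : Int) 1).foldl
          (fun plan r => plan.insert ("stage" ++ PySem.Int.toStr r) (pvStageSchedule (n : Int) nm r))
          PySem.Dict.empty).items := rfl
  rw [hB, PySem.List.pyRange_zero_natCast]
  rw [PySem.Dict.items_foldl_insert_fresh _ (fun r => "stage" ++ PySem.Int.toStr r)
      (pvStageSchedule (n : Int) nm) _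
      (fun a _ => PySem.Dict.contains_empty _) ?_]
  · have he : (PySem.Dict.empty : PySem.Dict String (List String)).items = [] := rfl
    rw [he, List.nil_append, List.map_map]
    apply List.map_congr_left
    intro k hk
    simp only [Function.comp_apply]
    exact Prod.ext rfl (pvStageSchedule_eq n nm k (List.mem_range.mp hk))
  · rw [List.map_map]
    exact pvNodupKeys n

lemma pvPortA (n : Nat) (nm : Int) :
    generate_1f1b_scheduler_plan (n : Int) nm
      = (List.range n).map (fun (k : Nat) => (pvKey (k : Int), pvContA n nm k)) := by
  have hA : generate_1f1b_scheduler_plan (n : Int) nm =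
      (let ranks := PySem.List.pyRange 0 (n : Int) 1
       let warm := ranks.foldl (pvStepW n) (PySem.Dict.empty, ranks.map (fun _ => (1 : Int)))
       let stab := ranks.foldl (pvStepS n nm) (warm.1, warm.2, ranks.map (fun _ => (1 : Int)))
       let cool := ranks.foldl (pvStepC n) (stab.1, stab.2.2)
       cool.1.items) := rfl
  rw [hA]
  simp only [PySem.List.pyRange_zero_natCast]
  have hone : ((List.range n).map (fun (k : Nat) => (k : Int))).map (fun _ => (1 : Int))
      = (List.range n).map (fun _ => (1 : Int)) := by
    rw [List.map_map]
    apply List.map_congr_left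
    intro i _
    rfl
  rw [hone]
  obtain ⟨w1, w2, w3⟩ := pvWarmPass n n le_rfl
  set warm := ((List.range n).map (fun (k : Nat) => (k : Int))).foldl (pvStepW n)
      (PySem.Dict.empty, (List.range n).map (fun _ => (1 : Int))) with hwarm
  have hfc : warm.2 = (List.range n).map (fun i => 1 + ((pvW n i : Nat) : Int)) := by
    rw [w3]
    apply List.map_congr_left
    intro i hi
    rw [if_pos (List.mem_range.mp hi)]
  rw [hfc]
  obtain ⟨s1, s2, s3, s4⟩ := pvStablePass n n nm le_rfl warm.1 w1
    (fun k hk => by rw [w2 k hk, if_pos hk])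
  set stab := ((List.range n).map (fun (k : Nat) => (k : Int))).foldl (pvStepS n nm)
      (warm.1, (List.range n).map (fun i => 1 + ((pvW n i : Nat) : Int)),
       (List.range n).map (fun _ => (1 : Int))) with hstab
  have hbc : stab.2.2 = (List.range n).map (fun i => 1 + ((pvS n nm i : Nat) : Int)) := by
    rw [s4]
    apply List.map_congr_left
    intro i hi
    rw [if_pos (List.mem_range.mp hi)]
  rw [hbc]
  obtain ⟨c1, c2, c3⟩ := pvCoolPass n n nm le_rfl stab.1 (by rw [s1, w1])
    (fun k hk => by rw [s2 k hk, if_pos hk])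
  set cool := ((List.range n).map (fun (k : Nat) => (k : Int))).foldl (pvStepC n)
      (stab.1, (List.range n).map (fun i => 1 + ((pvS n nm i : Nat) : Int))) with hcool
  have hkeys : cool.1.keys = (List.range n).map (fun (k : Nat) => pvKey (k : Int)) := by
    rw [c1, s1, w1]
  rw [PySem.Dict.items_eq_map_keys cool.1 (by rw [hkeys]; exact pvNodupKeys n) []]
  rw [hkeys, List.map_map]
  apply List.map_congr_left
  intro k hk
  simp only [Function.comp_apply]
  refine Prod.ext rfl ?_
  show cool.1.getD (pvKey (k : Int)) [] = pvContA n nm k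
  rw [c2 k (List.mem_range.mp hk), if_pos (List.mem_range.mp hk)]

-- ===== VERDICT (by name: the statement is the Claim_ definition above) =====
theorem generate_1f1b_scheduler_plan_spec : Claim_equal_generate_1f1b_scheduler_plan := by
  intro pp nm _
  show generate_1f1b_scheduler_plan pp nm = generate_1f1b_scheduler_plan_alt pp nm
  by_cases h : 0 ≤ pp
  · have hpp : pp = ((pp.toNat : Nat) : Int) := by omega
    rw [hpp, pvPortA, pvPortB]
  · have hz : pp.toNat = 0 := by omega
    have hr : PySem.List.pyRange 0 pp 1 = [] := by
      rw [PySem.List.pyRange_zero, hz]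
      rfl
    unfold generate_1f1b_scheduler_plan generate_1f1b_scheduler_plan_alt
    simp only [hr, List.map_nil, List.foldl_nil]
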